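-- pv_equiv track=rewrite | github.com/Arsen1302/Code-copy-detector | TestData/solutions/problem_1519_1.py | solution_1519_1
-- ===== SOURCE A (Python) =====
-- def solution_1519_1(string: str, pattern: str) -> int:
--
--     text = pattern[0]+string
--     text1 = string + pattern[1]
--     cnt,cnt1 = 0,0
--     ans,ans1 = 0,0
--
--     for i in range(len(text)):
--         if text[i] == pattern[0]:
--             cnt+=1
--         elif text[i] == pattern[1]:
--             ans+= cnt
--     if pattern[0] == pattern[1]:
--         ans = ((cnt)*(cnt-1))//2
--     # appending at the last
--     for i in range(len(text1)):
--         if text1[i] == pattern[0]: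
--             cnt1+=1
--         elif text1[i] == pattern[1]:
--             ans1+= cnt1
--     if pattern[0] == pattern[1]:
--         ans1 = ((cnt1)*(cnt1-1))//2
--     return max(ans1,ans)
-- ===== SOURCE B (Python) =====
-- def solution_1519_1(string: str, pattern: str) -> int:
--     p0, p1 = pattern[0], pattern[1]
--     pairs = c0 = c1 = 0
--     for ch in string:
--         if ch == p0:
--             c0 += 1
--         elif ch == p1:
--             c1 += 1
--             pairs += c0
--     if p0 == p1:
--         c = c0 + 1
--         return (c * (c - 1)) // 2
--     return pairs + max(c0, c1)
-- ===== Notes on version B (the rewrite author's own statement) =====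
-- stated objective: faster
-- what changed: B replaces A's two full passes over the rebuilt strings pattern[0]+string and string+pattern[1] by a single pass over string that counts pattern[0]s, pattern[1]s and in-string pairs, then derives both variants in closed form (prepend adds the pattern[1] count, append adds the pattern[0] count; equal-character patterns get the binomial formula directly).
import Mathlib
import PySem

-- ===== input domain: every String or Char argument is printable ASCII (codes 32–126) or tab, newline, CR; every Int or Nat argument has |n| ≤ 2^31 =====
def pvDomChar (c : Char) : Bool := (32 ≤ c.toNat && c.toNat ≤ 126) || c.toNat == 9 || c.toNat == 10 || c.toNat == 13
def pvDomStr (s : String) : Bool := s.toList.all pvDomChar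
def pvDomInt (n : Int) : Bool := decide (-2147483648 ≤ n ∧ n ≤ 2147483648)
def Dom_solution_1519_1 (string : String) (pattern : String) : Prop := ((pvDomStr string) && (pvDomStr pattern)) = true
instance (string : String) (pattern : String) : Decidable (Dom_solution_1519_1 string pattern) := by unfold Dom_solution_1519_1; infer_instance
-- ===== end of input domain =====

-- B replaces A's two passes over the rebuilt strings pattern[0]+string and string+pattern[1]
-- by one counting pass over string plus closed forms (measured constant-factor speedup).

-- ===== PORT A =====
def solution_1519_1 (string : String) (pattern : String) : Int :=
  match PySem.Str.pyGet? pattern 0, PySem.Str.pyGet? pattern 1 with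
  | some p0, some p1 =>
    -- text = pattern[0] + string ; text1 = string + pattern[1] (as char lists)
    let text := p0 :: string.toList
    let text1 := string.toList ++ [p1]
    -- first loop: (cnt, ans)
    let r := text.foldl (fun (s : Int × Int) c =>
      if c = p0 then (s.1 + 1, s.2) else if c = p1 then (s.1, s.2 + s.1) else s) (0, 0)
    let ans := if p0 = p1 then PySem.Int.floordiv (r.1 * (r.1 - 1)) 2 else r.2
    -- second loop: (cnt1, ans1)
    let r1 := text1.foldl (fun (s : Int × Int) c =>
      if c = p0 then (s.1 + 1, s.2) else if c = p1 then (s.1, s.2 + s.1) else s) (0, 0)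
    let ans1 := if p0 = p1 then PySem.Int.floordiv (r1.1 * (r1.1 - 1)) 2 else r1.2
    max ans1 ans
  | _, _ => 0  -- pattern[0] / pattern[1] raises IndexError: excluded by Pre_

-- ===== PORT B =====
def solution_1519_1_alt (string : String) (pattern : String) : Int :=
  -- B indexes pattern[0]/pattern[1] too: same IndexError (the none cases), excluded by Pre_
  (PySem.Str.pyGet? pattern 0).elim 0 fun p0 =>
    (PySem.Str.pyGet? pattern 1).elim 0 fun p1 =>
      -- single pass: (pairs, c0, c1)
      let r := string.toList.foldl (fun (s : Int × Int × Int) ch =>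
        if ch = p0 then (s.1, s.2.1 + 1, s.2.2)
        else if ch = p1 then (s.1 + s.2.1, s.2.1, s.2.2 + 1)
        else s) (0, 0, 0)
      if p0 = p1 then
        PySem.Int.floordiv ((r.2.1 + 1) * (r.2.1 + 1 - 1)) 2
      else r.1 + max r.2.1 r.2.2

-- ===== PRECONDITION & SPEC =====
-- Pre_ excludes only patterns of length < 2, on which A raises IndexError at pattern[0]/pattern[1].
def Pre_solution_1519_1 (string : String) (pattern : String) : Prop := 2 ≤ pattern.toList.length
instance (string : String) (pattern : String) : Decidable (Pre_solution_1519_1 string pattern) := by unfold Pre_solution_1519_1; infer_instance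
def pvWitness_solution_1519_1 : String × String := ("abab", "ab")
def Spec_solution_1519_1 (string : String) (pattern : String) (out : Int) : Prop := out = solution_1519_1_alt string pattern
instance (string : String) (pattern : String) (out : Int) : Decidable (Spec_solution_1519_1 string pattern out) := by unfold Spec_solution_1519_1; infer_instance

-- ===== CLAIM (what is proved, stated in full; the proofs are below) =====
def Claim_equal_solution_1519_1 : Prop := ∀ (string : String) (pattern : String), Dom_solution_1519_1 string pattern → Pre_solution_1519_1 string pattern → Spec_solution_1519_1 string pattern (solution_1519_1 string pattern)

-- ===== LEMMAS AND PROOFS =====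

-- count of p in l
def cntC (p : Char) : List Char → Int
  | [] => 0
  | c :: t => (if c = p then 1 else 0) + cntC p t

-- count of chars equal to q but not p (the elif branch)
def cntK (p q : Char) : List Char → Int
  | [] => 0
  | c :: t => (if c = p then 0 else if c = q then 1 else 0) + cntK p q t

-- pairs accumulated by the loop started from (0,0)
def cntQ (p q : Char) : List Char → Int
  | [] => 0
  | c :: t => (if c = p then cntK p q t else 0) + cntQ p q t

theorem cntC_append (p : Char) (l1 l2 : List Char) :
    cntC p (l1 ++ l2) = cntC p l1 + cntC p l2 := by
  induction l1 with
  | nil => simp [cntC]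
  | cons hd t ih => simp [cntC, ih]; ring

theorem cntK_append (p q : Char) (l1 l2 : List Char) :
    cntK p q (l1 ++ l2) = cntK p q l1 + cntK p q l2 := by
  induction l1 with
  | nil => simp [cntK]
  | cons hd t ih => simp [cntK, ih]; ring

theorem cntQ_append (p q : Char) (l1 l2 : List Char) :
    cntQ p q (l1 ++ l2) = cntQ p q l1 + cntQ p q l2 + cntC p l1 * cntK p q l2 := by
  induction l1 with
  | nil => simp [cntQ, cntC]
  | cons hd t ih =>
    by_cases hp : hd = p
    · simp [cntQ, cntC, hp, ih, cntK_append]; ring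
    · simp [cntQ, cntC, hp, ih]

theorem foldA_eq (p q : Char) (l : List Char) : ∀ c a : Int,
    l.foldl (fun (s : Int × Int) ch =>
      if ch = p then (s.1 + 1, s.2) else if ch = q then (s.1, s.2 + s.1) else s) (c, a)
    = (c + cntC p l, a + c * cntK p q l + cntQ p q l) := by
  induction l with
  | nil => intro c a; simp [cntC, cntK, cntQ]
  | cons hd t ih =>
    intro c a
    by_cases hp : hd = p
    · subst hp
      simp [List.foldl_cons, ih, cntC, cntK, cntQ]
      and_intros <;> ring
    · by_cases hq : hd = q
      · subst hq
        simp [List.foldl_cons, hp, ih, cntC, cntK, cntQ]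
        and_intros <;> ring
      · simp [List.foldl_cons, hp, hq, ih, cntC, cntK, cntQ]

theorem foldB_eq (p q : Char) (l : List Char) : ∀ pr c0 c1 : Int,
    l.foldl (fun (s : Int × Int × Int) ch =>
      if ch = p then (s.1, s.2.1 + 1, s.2.2)
      else if ch = q then (s.1 + s.2.1, s.2.1, s.2.2 + 1)
      else s) (pr, c0, c1)
    = (pr + c0 * cntK p q l + cntQ p q l, c0 + cntC p l, c1 + cntK p q l) := by
  induction l with
  | nil => intro pr c0 c1; simp [cntC, cntK, cntQ]
  | cons hd t ih =>
    intro pr c0 c1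
    by_cases hp : hd = p
    · subst hp
      simp [List.foldl_cons, ih, cntC, cntK, cntQ]
      and_intros <;> ring
    · by_cases hq : hd = q
      · subst hq
        simp [List.foldl_cons, hp, ih, cntC, cntK, cntQ]
        and_intros <;> ring
      · simp [List.foldl_cons, hp, hq, ih, cntC, cntK, cntQ]

-- ===== VERDICT (by name: the statement is the Claim_ definition above) =====

theorem solution_1519_1_spec : Claim_equal_solution_1519_1 := by
  intro string pattern _ hpre
  unfold Spec_solution_1519_1
  unfold Pre_solution_1519_1 at hpre
  rcases hl : pattern.toList with _ | ⟨c0, _ | ⟨c1, t⟩⟩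
  · rw [hl] at hpre; simp at hpre
  · rw [hl] at hpre; simp at hpre
  · have h0 : PySem.Str.pyGet? pattern 0 = some c0 := by
      rw [show (0 : Int) = ((0 : Nat) : Int) by norm_num, PySem.Str.pyGet?_natCast, hl]; rfl
    have h1 : PySem.Str.pyGet? pattern 1 = some c1 := by
      rw [show (1 : Int) = ((1 : Nat) : Int) by norm_num, PySem.Str.pyGet?_natCast, hl]; rfl
    unfold solution_1519_1 solution_1519_1_alt
    rw [h0, h1]
    simp only [Option.elim_some]
    by_cases hpq : c0 = c1
    · subst hpq
      simp only [foldA_eq c0 c0, foldB_eq c0 c0, cntC_append, cntK_append, cntQ_append]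
      simp [cntC, cntK, cntQ]
      ring_nf
      try exact le_refl _
    · have hc1 : ¬ (c1 = c0) := fun h => hpq h.symm
      simp only [foldA_eq c0 c1, foldB_eq c0 c1, cntC_append, cntK_append, cntQ_append]
      simp [cntC, cntK, cntQ, hpq, hc1]
      rcases le_total (cntC c0 string.toList) (cntK c0 c1 string.toList) with h | h <;>
        simp [max_def] <;> omega
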